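-- pv_equiv track=rewrite | github.com/VeriTalent-Organization/VeriTalent | ai/src/core/insights/career_recommender.py | _match_roles_to_skills
-- ===== SOURCE A (Python) =====
-- def _match_roles_to_skills(skills: list[str]) -> list[str]:
--     """Match skills to potential job roles."""
--     # Simple skill-to-role mapping
--     role_skills = {
--         "Software Engineer": ["Python", "JavaScript", "Java", "C++", "Git"],
--         "Data Analyst": ["Python", "SQL", "Excel", "Data Analysis", "Statistics"],
--         "Data Scientist": ["Python", "Machine Learning", "Statistics", "SQL", "R"],
--         "Marketing Manager": ["Digital Marketing", "SEO", "Content Strategy", "Analytics"],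
--         "Product Manager": ["Product Management", "Agile", "Communication", "Analytics"],
--         "Frontend Developer": ["JavaScript", "React", "HTML", "CSS", "TypeScript"],
--         "Backend Developer": ["Python", "Node.js", "Java", "SQL", "API"],
--         "DevOps Engineer": ["Docker", "Kubernetes", "CI/CD", "AWS", "Linux"],
--         "UX Designer": ["UI/UX", "Figma", "User Research", "Prototyping"],
--         "Project Manager": ["Project Management", "Agile", "Communication", "Leadership"],
--     }
--
--     skills_lower = [s.lower() for s in skills]
--     role_scores = {}
--
--     for role, required_skills in role_skills.items():
--         matches = sum(
--             1 for rs in required_skills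
--             if rs.lower() in skills_lower
--         )
--         if matches > 0:
--             role_scores[role] = matches / len(required_skills)
--
--     # Sort by score and return top roles
--     sorted_roles = sorted(
--         role_scores.items(),
--         key=lambda x: x[1],
--         reverse=True
--     )
--
--     return [role for role, _ in sorted_roles]
-- ===== SOURCE B (Python) =====
-- def _match_roles_to_skills(skills: list[str]) -> list[str]:
--     """Match skills to potential job roles (inverted-index formulation)."""
--     role_skills = {
--         "Software Engineer": ["Python", "JavaScript", "Java", "C++", "Git"],
--         "Data Analyst": ["Python", "SQL", "Excel", "Data Analysis", "Statistics"],
--         "Data Scientist": ["Python", "Machine Learning", "Statistics", "SQL", "R"],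
--         "Marketing Manager": ["Digital Marketing", "SEO", "Content Strategy", "Analytics"],
--         "Product Manager": ["Product Management", "Agile", "Communication", "Analytics"],
--         "Frontend Developer": ["JavaScript", "React", "HTML", "CSS", "TypeScript"],
--         "Backend Developer": ["Python", "Node.js", "Java", "SQL", "API"],
--         "DevOps Engineer": ["Docker", "Kubernetes", "CI/CD", "AWS", "Linux"],
--         "UX Designer": ["UI/UX", "Figma", "User Research", "Prototyping"],
--         "Project Manager": ["Project Management", "Agile", "Communication", "Leadership"],
--     }
--
--     # Inverted index: lowercased required skill -> roles requiring it.
--     index = {}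
--     for role, required in role_skills.items():
--         for rs in required:
--             index.setdefault(rs.lower(), []).append(role)
--
--     # Count matches per role by walking the deduped input skills once.
--     counts = {}
--     for s in set(s.lower() for s in skills):
--         for role in index.get(s, []):
--             counts[role] = counts.get(role, 0) + 1
--
--     # role_scores in role_skills order so stable-sort tie order matches.
--     role_scores = {
--         role: counts[role] / len(required)
--         for role, required in role_skills.items()
--         if counts.get(role, 0) > 0
--     }
--
--     sorted_roles = sorted(role_scores.items(), key=lambda x: x[1], reverse=True)
--     return [role for role, _ in sorted_roles]
-- ===== Notes on version B (the rewrite author's own statement) =====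
-- stated objective: faster
-- what changed: A scans the full lowercased input list once per required skill of every role (role-to-skills traversal); B builds an inverted index from lowercased required skill to the roles requiring it, dedupes the input into a set, and walks that set once incrementing a per-role counter (skill-to-roles traversal), then emits scores in table order and sorts as before.
import Mathlib
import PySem

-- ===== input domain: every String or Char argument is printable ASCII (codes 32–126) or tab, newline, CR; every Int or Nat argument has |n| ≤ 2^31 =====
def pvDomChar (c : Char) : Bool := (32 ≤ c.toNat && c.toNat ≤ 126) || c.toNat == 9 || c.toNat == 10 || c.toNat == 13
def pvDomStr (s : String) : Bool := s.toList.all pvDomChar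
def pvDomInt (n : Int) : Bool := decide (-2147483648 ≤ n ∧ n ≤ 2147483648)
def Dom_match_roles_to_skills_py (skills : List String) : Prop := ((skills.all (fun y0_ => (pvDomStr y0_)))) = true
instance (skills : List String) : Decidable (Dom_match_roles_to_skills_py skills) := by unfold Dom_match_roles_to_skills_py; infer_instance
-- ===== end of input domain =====

-- B replaces A's role→skills scan of the full input list by an inverted index (skill→roles) walked once
-- over the deduplicated input skills (objective: alternative decomposition, same result).
-- In both ports the Python float score matches/len(required) is represented by the order-isomorphic
-- integer matches * (20 / len): every required list has length 4 or 5 (both divide 20, so the value is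
-- exact) and IEEE doubles of these fractions have the same equality/order as the rationals themselves
-- (the minimal gap 1/20 dwarfs the rounding error), so the sorted order and ties are Python-exact.

-- ===== PORT A =====
def roleSkills : List (String × List String) := [
    ("Software Engineer", ["Python", "JavaScript", "Java", "C++", "Git"]),
    ("Data Analyst", ["Python", "SQL", "Excel", "Data Analysis", "Statistics"]),
    ("Data Scientist", ["Python", "Machine Learning", "Statistics", "SQL", "R"]),
    ("Marketing Manager", ["Digital Marketing", "SEO", "Content Strategy", "Analytics"]),
    ("Product Manager", ["Product Management", "Agile", "Communication", "Analytics"]),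
    ("Frontend Developer", ["JavaScript", "React", "HTML", "CSS", "TypeScript"]),
    ("Backend Developer", ["Python", "Node.js", "Java", "SQL", "API"]),
    ("DevOps Engineer", ["Docker", "Kubernetes", "CI/CD", "AWS", "Linux"]),
    ("UX Designer", ["UI/UX", "Figma", "User Research", "Prototyping"]),
    ("Project Manager", ["Project Management", "Agile", "Communication", "Leadership"])]

def match_roles_to_skills_py (skills : List String) : List String :=
  let skillsLower := skills.map PySem.Str.lower
  let roleScores : PySem.Dict String Int :=
    roleSkills.foldl
      (fun d p =>
        let matched : Int :=
          p.2.foldl (fun acc rs => if skillsLower.contains (PySem.Str.lower rs) then acc + 1 else acc) 0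
        if matched > 0 then d.insert p.1 (matched * (20 / (p.2.length : Int))) else d)
      PySem.Dict.empty
  (PySem.List.sorted roleScores.items (fun x => x.2) true).map (fun x => x.1)

-- ===== PORT B =====
-- index.setdefault(rs.lower(), []).append(role), iterating roleSkills once
def skillIndex : PySem.Dict String (List String) :=
  roleSkills.foldl
    (fun d p => p.2.foldl (fun d2 rs => d2.modify (PySem.Str.lower rs) [] (fun l => l ++ [p.1])) d)
    PySem.Dict.empty

def match_roles_to_skills_py_alt (skills : List String) : List String :=
  let skillSet : PySem.Set String := PySem.Set.ofList (skills.map PySem.Str.lower)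
  -- counts[role] += 1 for each role requiring a (deduplicated) input skill; the counts dict is only
  -- looked up afterwards, so Python's set-iteration order does not affect the result
  let counts : PySem.Dict String Int :=
    skillSet.foldl
      (fun c s => (skillIndex.getD s []).foldl (fun c2 r => c2.insert r (c2.getD r 0 + 1)) c)
      PySem.Dict.empty
  let roleScores : PySem.Dict String Int :=
    roleSkills.foldl
      (fun d p => if counts.getD p.1 0 > 0 then d.insert p.1 (counts.getD p.1 0 * (20 / (p.2.length : Int))) else d)
      PySem.Dict.empty
  (PySem.List.sorted roleScores.items (fun x => x.2) true).map (fun x => x.1)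

-- ===== PRECONDITION & SPEC =====
def Spec_match_roles_to_skills_py (skills : List String) (out : List String) : Prop := out = match_roles_to_skills_py_alt skills
instance (skills : List String) (out : List String) : Decidable (Spec_match_roles_to_skills_py skills out) := by unfold Spec_match_roles_to_skills_py; infer_instance

-- ===== CLAIM (what is proved, stated in full; the proofs are below) =====
def Claim_equal_match_roles_to_skills_py : Prop := ∀ (skills : List String), Dom_match_roles_to_skills_py skills → Spec_match_roles_to_skills_py skills (match_roles_to_skills_py skills)

-- ===== LEMMAS AND PROOFS =====

-- skillIndex as a literal association list (proof-side only)
def skillIndexItems : List (String × List String) := [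
    ("python", ["Software Engineer", "Data Analyst", "Data Scientist", "Backend Developer"]),
    ("javascript", ["Software Engineer", "Frontend Developer"]),
    ("java", ["Software Engineer", "Backend Developer"]),
    ("c++", ["Software Engineer"]),
    ("git", ["Software Engineer"]),
    ("sql", ["Data Analyst", "Data Scientist", "Backend Developer"]),
    ("excel", ["Data Analyst"]),
    ("data analysis", ["Data Analyst"]),
    ("statistics", ["Data Analyst", "Data Scientist"]),
    ("machine learning", ["Data Scientist"]),
    ("r", ["Data Scientist"]),
    ("digital marketing", ["Marketing Manager"]),
    ("seo", ["Marketing Manager"]),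
    ("content strategy", ["Marketing Manager"]),
    ("analytics", ["Marketing Manager", "Product Manager"]),
    ("product management", ["Product Manager"]),
    ("agile", ["Product Manager", "Project Manager"]),
    ("communication", ["Product Manager", "Project Manager"]),
    ("react", ["Frontend Developer"]),
    ("html", ["Frontend Developer"]),
    ("css", ["Frontend Developer"]),
    ("typescript", ["Frontend Developer"]),
    ("node.js", ["Backend Developer"]),
    ("api", ["Backend Developer"]),
    ("docker", ["DevOps Engineer"]),
    ("kubernetes", ["DevOps Engineer"]),
    ("ci/cd", ["DevOps Engineer"]),
    ("aws", ["DevOps Engineer"]),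
    ("linux", ["DevOps Engineer"]),
    ("ui/ux", ["UX Designer"]),
    ("figma", ["UX Designer"]),
    ("user research", ["UX Designer"]),
    ("prototyping", ["UX Designer"]),
    ("project management", ["Project Manager"]),
    ("leadership", ["Project Manager"])]

set_option maxRecDepth 65536 in
lemma skillIndex_eq : skillIndex = PySem.Dict.mk skillIndexItems := by decide

-- the counting loop of B: final count of r = Σ over the walked skills of r's multiplicity in index[s]
lemma counts_getD_fold (S : List String) (r : String) : ∀ (c : PySem.Dict String Int),
    (S.foldl (fun c s => (skillIndex.getD s []).foldl (fun c2 r => c2.insert r (c2.getD r 0 + 1)) c) c).getD r 0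
    = c.getD r 0 + (S.map (fun s => ((skillIndex.getD s []).count r : Int))).sum := by
  induction S with
  | nil => intro c; simp only [List.foldl_nil, List.map_nil, List.sum_nil, add_zero]
  | cons s t ih =>
    intro c
    simp only [List.foldl_cons, List.map_cons, List.sum_cons, ih]
    rw [PySem.Dict.getD_foldl_insert_add_one]
    ring

-- Σ over a duplicate-free list of an equality indicator is a membership indicator
lemma sum_ite_eq_mem (S : List String) (hS : S.Nodup) (k : String) (c : Int) :
    (S.map (fun s => if s = k then c else 0)).sum = if k ∈ S then c else 0 := by
  induction S with
  | nil => simp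
  | cons x t ih =>
    simp only [List.nodup_cons] at hS
    simp only [List.map_cons, List.sum_cons, List.mem_cons, ih hS.2]
    by_cases hx : x = k
    · subst hx
      simp [hS.1]
    · simp [hx, Ne.symm hx]

-- double-counting swap: Σ_(s ∈ S) count r (lookup d s) = Σ_((k,L) ∈ d) [k ∈ S] * count r L
lemma sum_count_mk (d : List (String × List String)) (hk : (d.map Prod.fst).Nodup)
    (S : List String) (hS : S.Nodup) (r : String) :
    (S.map (fun s => (((PySem.Dict.mk d).getD s []).count r : Int))).sum
    = (d.map (fun p => if p.1 ∈ S then (p.2.count r : Int) else 0)).sum := by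
  induction d with
  | nil =>
    simp [PySem.Dict.getD_eq_get?_getD, PySem.Dict.get?]
  | cons q d' ih =>
    obtain ⟨k, L⟩ := q
    rw [List.map_cons] at hk
    have hk1 := (List.nodup_cons.mp hk).1
    have hk2 := (List.nodup_cons.mp hk).2
    have hk' : (PySem.Dict.mk d').getD k ([] : List String) = [] := by
      apply PySem.Dict.getD_of_not_contains
      rw [← Bool.not_eq_true, PySem.Dict.contains_iff_mem_keys]
      simpa [PySem.Dict.keys] using hk1
    have hpt : (fun s => (((PySem.Dict.mk ((k, L) :: d')).getD s []).count r : Int))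
        = fun s => (if s = k then (L.count r : Int) else 0)
            + (((PySem.Dict.mk d').getD s []).count r : Int) := by
      funext s
      rw [PySem.Dict.getD_eq_get?_getD, PySem.Dict.get?_mk_cons]
      by_cases h : s = k
      · subst h
        simp [hk']
      · simp [Ne.symm h, h, PySem.Dict.getD_eq_get?_getD]
    rw [hpt, List.map_cons, List.sum_cons]
    have hsplit := PySem.List.sum_map_add_int S
      (fun s => if s = k then (L.count r : Int) else 0)
      (fun s => (((PySem.Dict.mk d').getD s []).count r : Int))
    rw [hsplit, ih hk2, sum_ite_eq_mem S hS k]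

-- B's count for a role, as a sum over the literal inverted index
lemma counts_getD_eq (skills : List String) (r : String) :
    ((PySem.Set.ofList (skills.map PySem.Str.lower)).foldl (fun c s => (skillIndex.getD s []).foldl (fun c2 r => c2.insert r (c2.getD r 0 + 1)) c) PySem.Dict.empty).getD r 0
    = (skillIndexItems.map (fun p => if p.1 ∈ skills.map PySem.Str.lower then (p.2.count r : Int) else 0)).sum := by
  rw [counts_getD_fold, PySem.Dict.getD_empty, zero_add, skillIndex_eq,
    sum_count_mk skillIndexItems (by decide) _ (PySem.Set.nodup_ofList _) r]
  simp only [PySem.Set.mem_ofList]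

-- per-role: A's scan of the required list equals B's counted matches
set_option maxRecDepth 65536 in
lemma matches_eq_0 (skills : List String) :
    (["Python", "JavaScript", "Java", "C++", "Git"] : List String).foldl
      (fun acc rs => if (skills.map PySem.Str.lower).contains (PySem.Str.lower rs) then acc + 1 else acc) (0 : Int)
    = ((PySem.Set.ofList (skills.map PySem.Str.lower)).foldl (fun c s => (skillIndex.getD s []).foldl (fun c2 r => c2.insert r (c2.getD r 0 + 1)) c) PySem.Dict.empty).getD "Software Engineer" 0 := by
  rw [counts_getD_eq skills "Software Engineer"]
  simp only [skillIndexItems, List.map_cons, List.map_nil, List.sum_cons, List.sum_nil,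
    List.count_cons, List.count_nil, List.foldl_cons, List.foldl_nil,
    (show PySem.Str.lower "Python" = "python" from by decide), (show PySem.Str.lower "JavaScript" = "javascript" from by decide), (show PySem.Str.lower "Java" = "java" from by decide), (show PySem.Str.lower "C++" = "c++" from by decide), (show PySem.Str.lower "Git" = "git" from by decide), List.contains_eq_mem]
  norm_num
  split_ifs <;> omega

set_option maxRecDepth 65536 in
lemma matches_eq_1 (skills : List String) :
    (["Python", "SQL", "Excel", "Data Analysis", "Statistics"] : List String).foldl
      (fun acc rs => if (skills.map PySem.Str.lower).contains (PySem.Str.lower rs) then acc + 1 else acc) (0 : Int)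
    = ((PySem.Set.ofList (skills.map PySem.Str.lower)).foldl (fun c s => (skillIndex.getD s []).foldl (fun c2 r => c2.insert r (c2.getD r 0 + 1)) c) PySem.Dict.empty).getD "Data Analyst" 0 := by
  rw [counts_getD_eq skills "Data Analyst"]
  simp only [skillIndexItems, List.map_cons, List.map_nil, List.sum_cons, List.sum_nil,
    List.count_cons, List.count_nil, List.foldl_cons, List.foldl_nil,
    (show PySem.Str.lower "Python" = "python" from by decide), (show PySem.Str.lower "SQL" = "sql" from by decide), (show PySem.Str.lower "Excel" = "excel" from by decide), (show PySem.Str.lower "Data Analysis" = "data analysis" from by decide), (show PySem.Str.lower "Statistics" = "statistics" from by decide), List.contains_eq_mem]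
  norm_num
  split_ifs <;> omega

set_option maxRecDepth 65536 in
lemma matches_eq_2 (skills : List String) :
    (["Python", "Machine Learning", "Statistics", "SQL", "R"] : List String).foldl
      (fun acc rs => if (skills.map PySem.Str.lower).contains (PySem.Str.lower rs) then acc + 1 else acc) (0 : Int)
    = ((PySem.Set.ofList (skills.map PySem.Str.lower)).foldl (fun c s => (skillIndex.getD s []).foldl (fun c2 r => c2.insert r (c2.getD r 0 + 1)) c) PySem.Dict.empty).getD "Data Scientist" 0 := by
  rw [counts_getD_eq skills "Data Scientist"]
  simp only [skillIndexItems, List.map_cons, List.map_nil, List.sum_cons, List.sum_nil,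
    List.count_cons, List.count_nil, List.foldl_cons, List.foldl_nil,
    (show PySem.Str.lower "Python" = "python" from by decide), (show PySem.Str.lower "Machine Learning" = "machine learning" from by decide), (show PySem.Str.lower "Statistics" = "statistics" from by decide), (show PySem.Str.lower "SQL" = "sql" from by decide), (show PySem.Str.lower "R" = "r" from by decide), List.contains_eq_mem]
  norm_num
  split_ifs <;> omega

set_option maxRecDepth 65536 in
lemma matches_eq_3 (skills : List String) :
    (["Digital Marketing", "SEO", "Content Strategy", "Analytics"] : List String).foldl
      (fun acc rs => if (skills.map PySem.Str.lower).contains (PySem.Str.lower rs) then acc + 1 else acc) (0 : Int)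
    = ((PySem.Set.ofList (skills.map PySem.Str.lower)).foldl (fun c s => (skillIndex.getD s []).foldl (fun c2 r => c2.insert r (c2.getD r 0 + 1)) c) PySem.Dict.empty).getD "Marketing Manager" 0 := by
  rw [counts_getD_eq skills "Marketing Manager"]
  simp only [skillIndexItems, List.map_cons, List.map_nil, List.sum_cons, List.sum_nil,
    List.count_cons, List.count_nil, List.foldl_cons, List.foldl_nil,
    (show PySem.Str.lower "Digital Marketing" = "digital marketing" from by decide), (show PySem.Str.lower "SEO" = "seo" from by decide), (show PySem.Str.lower "Content Strategy" = "content strategy" from by decide), (show PySem.Str.lower "Analytics" = "analytics" from by decide), List.contains_eq_mem]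
  norm_num
  split_ifs <;> omega

set_option maxRecDepth 65536 in
lemma matches_eq_4 (skills : List String) :
    (["Product Management", "Agile", "Communication", "Analytics"] : List String).foldl
      (fun acc rs => if (skills.map PySem.Str.lower).contains (PySem.Str.lower rs) then acc + 1 else acc) (0 : Int)
    = ((PySem.Set.ofList (skills.map PySem.Str.lower)).foldl (fun c s => (skillIndex.getD s []).foldl (fun c2 r => c2.insert r (c2.getD r 0 + 1)) c) PySem.Dict.empty).getD "Product Manager" 0 := by
  rw [counts_getD_eq skills "Product Manager"]
  simp only [skillIndexItems, List.map_cons, List.map_nil, List.sum_cons, List.sum_nil,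
    List.count_cons, List.count_nil, List.foldl_cons, List.foldl_nil,
    (show PySem.Str.lower "Product Management" = "product management" from by decide), (show PySem.Str.lower "Agile" = "agile" from by decide), (show PySem.Str.lower "Communication" = "communication" from by decide), (show PySem.Str.lower "Analytics" = "analytics" from by decide), List.contains_eq_mem]
  norm_num
  split_ifs <;> omega

set_option maxRecDepth 65536 in
lemma matches_eq_5 (skills : List String) :
    (["JavaScript", "React", "HTML", "CSS", "TypeScript"] : List String).foldl
      (fun acc rs => if (skills.map PySem.Str.lower).contains (PySem.Str.lower rs) then acc + 1 else acc) (0 : Int)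
    = ((PySem.Set.ofList (skills.map PySem.Str.lower)).foldl (fun c s => (skillIndex.getD s []).foldl (fun c2 r => c2.insert r (c2.getD r 0 + 1)) c) PySem.Dict.empty).getD "Frontend Developer" 0 := by
  rw [counts_getD_eq skills "Frontend Developer"]
  simp only [skillIndexItems, List.map_cons, List.map_nil, List.sum_cons, List.sum_nil,
    List.count_cons, List.count_nil, List.foldl_cons, List.foldl_nil,
    (show PySem.Str.lower "JavaScript" = "javascript" from by decide), (show PySem.Str.lower "React" = "react" from by decide), (show PySem.Str.lower "HTML" = "html" from by decide), (show PySem.Str.lower "CSS" = "css" from by decide), (show PySem.Str.lower "TypeScript" = "typescript" from by decide), List.contains_eq_mem]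
  norm_num
  split_ifs <;> omega

set_option maxRecDepth 65536 in
lemma matches_eq_6 (skills : List String) :
    (["Python", "Node.js", "Java", "SQL", "API"] : List String).foldl
      (fun acc rs => if (skills.map PySem.Str.lower).contains (PySem.Str.lower rs) then acc + 1 else acc) (0 : Int)
    = ((PySem.Set.ofList (skills.map PySem.Str.lower)).foldl (fun c s => (skillIndex.getD s []).foldl (fun c2 r => c2.insert r (c2.getD r 0 + 1)) c) PySem.Dict.empty).getD "Backend Developer" 0 := by
  rw [counts_getD_eq skills "Backend Developer"]
  simp only [skillIndexItems, List.map_cons, List.map_nil, List.sum_cons, List.sum_nil,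
    List.count_cons, List.count_nil, List.foldl_cons, List.foldl_nil,
    (show PySem.Str.lower "Python" = "python" from by decide), (show PySem.Str.lower "Node.js" = "node.js" from by decide), (show PySem.Str.lower "Java" = "java" from by decide), (show PySem.Str.lower "SQL" = "sql" from by decide), (show PySem.Str.lower "API" = "api" from by decide), List.contains_eq_mem]
  norm_num
  split_ifs <;> omega

set_option maxRecDepth 65536 in
lemma matches_eq_7 (skills : List String) :
    (["Docker", "Kubernetes", "CI/CD", "AWS", "Linux"] : List String).foldl
      (fun acc rs => if (skills.map PySem.Str.lower).contains (PySem.Str.lower rs) then acc + 1 else acc) (0 : Int)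
    = ((PySem.Set.ofList (skills.map PySem.Str.lower)).foldl (fun c s => (skillIndex.getD s []).foldl (fun c2 r => c2.insert r (c2.getD r 0 + 1)) c) PySem.Dict.empty).getD "DevOps Engineer" 0 := by
  rw [counts_getD_eq skills "DevOps Engineer"]
  simp only [skillIndexItems, List.map_cons, List.map_nil, List.sum_cons, List.sum_nil,
    List.count_cons, List.count_nil, List.foldl_cons, List.foldl_nil,
    (show PySem.Str.lower "Docker" = "docker" from by decide), (show PySem.Str.lower "Kubernetes" = "kubernetes" from by decide), (show PySem.Str.lower "CI/CD" = "ci/cd" from by decide), (show PySem.Str.lower "AWS" = "aws" from by decide), (show PySem.Str.lower "Linux" = "linux" from by decide), List.contains_eq_mem]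
  norm_num
  split_ifs <;> omega

set_option maxRecDepth 65536 in
lemma matches_eq_8 (skills : List String) :
    (["UI/UX", "Figma", "User Research", "Prototyping"] : List String).foldl
      (fun acc rs => if (skills.map PySem.Str.lower).contains (PySem.Str.lower rs) then acc + 1 else acc) (0 : Int)
    = ((PySem.Set.ofList (skills.map PySem.Str.lower)).foldl (fun c s => (skillIndex.getD s []).foldl (fun c2 r => c2.insert r (c2.getD r 0 + 1)) c) PySem.Dict.empty).getD "UX Designer" 0 := by
  rw [counts_getD_eq skills "UX Designer"]
  simp only [skillIndexItems, List.map_cons, List.map_nil, List.sum_cons, List.sum_nil,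
    List.count_cons, List.count_nil, List.foldl_cons, List.foldl_nil,
    (show PySem.Str.lower "UI/UX" = "ui/ux" from by decide), (show PySem.Str.lower "Figma" = "figma" from by decide), (show PySem.Str.lower "User Research" = "user research" from by decide), (show PySem.Str.lower "Prototyping" = "prototyping" from by decide), List.contains_eq_mem]
  norm_num
  split_ifs <;> omega

set_option maxRecDepth 65536 in
lemma matches_eq_9 (skills : List String) :
    (["Project Management", "Agile", "Communication", "Leadership"] : List String).foldl
      (fun acc rs => if (skills.map PySem.Str.lower).contains (PySem.Str.lower rs) then acc + 1 else acc) (0 : Int)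
    = ((PySem.Set.ofList (skills.map PySem.Str.lower)).foldl (fun c s => (skillIndex.getD s []).foldl (fun c2 r => c2.insert r (c2.getD r 0 + 1)) c) PySem.Dict.empty).getD "Project Manager" 0 := by
  rw [counts_getD_eq skills "Project Manager"]
  simp only [skillIndexItems, List.map_cons, List.map_nil, List.sum_cons, List.sum_nil,
    List.count_cons, List.count_nil, List.foldl_cons, List.foldl_nil,
    (show PySem.Str.lower "Project Management" = "project management" from by decide), (show PySem.Str.lower "Agile" = "agile" from by decide), (show PySem.Str.lower "Communication" = "communication" from by decide), (show PySem.Str.lower "Leadership" = "leadership" from by decide), List.contains_eq_mem]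
  norm_num
  split_ifs <;> omega


-- ===== VERDICT (by name: the statement is the Claim_ definition above) =====
set_option maxRecDepth 65536 in
theorem match_roles_to_skills_py_spec : Claim_equal_match_roles_to_skills_py := by
  intro skills _
  unfold Spec_match_roles_to_skills_py match_roles_to_skills_py match_roles_to_skills_py_alt
  have h : roleSkills.foldl
      (fun d (p : String × List String) =>
        if (p.2.foldl (fun acc rs => if (skills.map PySem.Str.lower).contains (PySem.Str.lower rs) then acc + 1 else acc) (0 : Int)) > 0
        then d.insert p.1 ((p.2.foldl (fun acc rs => if (skills.map PySem.Str.lower).contains (PySem.Str.lower rs) then acc + 1 else acc) (0 : Int)) * (20 / (p.2.length : Int)))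
        else d)
      PySem.Dict.empty
      = roleSkills.foldl
      (fun d (p : String × List String) =>
        if (((PySem.Set.ofList (skills.map PySem.Str.lower)).foldl (fun c s => (skillIndex.getD s []).foldl (fun c2 r => c2.insert r (c2.getD r 0 + 1)) c) PySem.Dict.empty : PySem.Dict String Int)).getD p.1 0 > 0
        then d.insert p.1 ((((PySem.Set.ofList (skills.map PySem.Str.lower)).foldl (fun c s => (skillIndex.getD s []).foldl (fun c2 r => c2.insert r (c2.getD r 0 + 1)) c) PySem.Dict.empty : PySem.Dict String Int)).getD p.1 0 * (20 / (p.2.length : Int)))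
        else d)
      PySem.Dict.empty := by
    apply PySem.List.foldl_congr_mem'
    intro p hp d
    simp only [roleSkills, List.mem_cons, List.not_mem_nil, or_false] at hp
    rcases hp with rfl | rfl | rfl | rfl | rfl | rfl | rfl | rfl | rfl | rfl <;>
      simp only [matches_eq_0, matches_eq_1, matches_eq_2, matches_eq_3, matches_eq_4,
        matches_eq_5, matches_eq_6, matches_eq_7, matches_eq_8, matches_eq_9]
  simp only [h]
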